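-- pv_equiv track=rewrite | github.com/gbuser/aoc2023 | 12/12.1.py | convert_springs
-- ===== SOURCE A (Python) =====
-- def convert_springs(springs, combo):
--     converted = ''
--     for index, value in enumerate(springs):
--         if value == '?':
--             converted += ('#' if index in combo else '.')
--         else:
--             converted += value
--     return converted
-- ===== SOURCE B (Python) =====
-- def convert_springs(springs, combo):
--     out = ['.' if c == '?' else c for c in springs]
--     n = len(springs)
--     for i in combo:
--         if 0 <= i < n and springs[i] == '?':
--             out[i] = '#'
--     return ''.join(out)
-- ===== Notes on version B (the rewrite author's own statement) =====
-- stated objective: alternative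
-- what changed: Instead of testing 'index in combo' for every '?' character, B builds the '?'->'.' baseline in one pass and then iterates over combo's indices, writing '#' at each in-range index whose original char is '?'.
import Mathlib
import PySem

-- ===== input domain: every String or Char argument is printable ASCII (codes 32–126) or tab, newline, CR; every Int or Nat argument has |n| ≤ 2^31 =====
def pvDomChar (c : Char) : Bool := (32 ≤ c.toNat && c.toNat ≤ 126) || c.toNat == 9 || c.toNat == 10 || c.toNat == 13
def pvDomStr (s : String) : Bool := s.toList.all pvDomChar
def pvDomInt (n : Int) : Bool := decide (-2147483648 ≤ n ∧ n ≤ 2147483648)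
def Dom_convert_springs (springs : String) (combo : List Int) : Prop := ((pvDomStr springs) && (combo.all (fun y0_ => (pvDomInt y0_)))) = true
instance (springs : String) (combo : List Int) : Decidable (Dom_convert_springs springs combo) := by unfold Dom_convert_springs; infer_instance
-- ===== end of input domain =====

-- B replaces the per-'?' membership scan of combo by one baseline pass plus one pass over combo writing the marks (alternative decomposition).

-- ===== PORT A =====
-- converted += one char per position over enumerate(springs); '?' gets '#'/'.' by membership 'index in combo'
def convert_springs (springs : String) (combo : List Int) : String :=
  String.ofList ((PySem.List.enumerate springs.toList).foldl
    (fun acc p => acc ++ [if p.2 = '?' then (if p.1 ∈ combo then '#' else '.') else p.2]) [])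

-- ===== PORT B =====
-- baseline with '?'→'.', then write '#' at each in-range combo index whose original char is '?'
def convert_springs_alt (springs : String) (combo : List Int) : String :=
  let orig := springs.toList
  let out := orig.map (fun c => if c = '?' then '.' else c)
  let n : Int := (orig.length : Int)
  String.ofList (combo.foldl
    (fun l i => if 0 ≤ i ∧ i < n ∧ orig[i.toNat]? = some '?' then l.set i.toNat '#' else l) out)

-- ===== PRECONDITION & SPEC =====
def Spec_convert_springs (springs : String) (combo : List Int) (out : String) : Prop := out = convert_springs_alt springs combo
instance (springs : String) (combo : List Int) (out : String) : Decidable (Spec_convert_springs springs combo out) := by unfold Spec_convert_springs; infer_instance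

-- ===== CLAIM (what is proved, stated in full; the proofs are below) =====
def Claim_equal_convert_springs : Prop := ∀ (springs : String) (combo : List Int), Dom_convert_springs springs combo → Spec_convert_springs springs combo (convert_springs springs combo)

-- ===== LEMMAS AND PROOFS =====

-- A's string-building loop is acc ++ map over the enumerate list
theorem foldl_snoc {α : Type} (f : α → Char) :
    ∀ (l : List α) (acc : List Char),
      l.foldl (fun a p => a ++ [f p]) acc = acc ++ l.map f := by
  intro l
  induction l with
  | nil => simp [List.foldl]
  | cons x xs ih => intro acc; simp [List.foldl, ih]

-- element-wise characterization of B's fold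
theorem fold_getElem? (orig : List Char) :
    ∀ (combo : List Int) (l : List Char), l.length = orig.length →
      ∀ (j : Nat),
      (combo.foldl
        (fun l i => if 0 ≤ i ∧ i < (orig.length : Int) ∧ orig[i.toNat]? = some '?' then l.set i.toNat '#' else l)
        l)[j]? =
      if (j : Int) ∈ combo ∧ orig[j]? = some '?' then some '#' else l[j]? := by
  intro combo
  induction combo with
  | nil => intro l _ j; simp
  | cons i rest ih =>
    intro l hlen j
    simp only [List.foldl]
    by_cases hg : 0 ≤ i ∧ i < (orig.length : Int) ∧ orig[i.toNat]? = some '?'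
    · rw [if_pos hg, ih _ (by rw [List.length_set]; exact hlen)]
      by_cases hr : (j : Int) ∈ rest ∧ orig[j]? = some '?'
      · rw [if_pos hr, if_pos ⟨List.mem_cons_of_mem _ hr.1, hr.2⟩]
      · rw [if_neg hr]
        by_cases hij : i.toNat = j
        · subst hij
          have hq : orig[i.toNat]? = some '?' := hg.2.2
          rw [List.getElem?_set_self (by rw [hlen]; omega)]
          rw [if_pos ⟨by
                have h0 : ((i.toNat : Nat) : Int) = i := by omega
                rw [h0]; exact List.mem_cons_self, hq⟩]
        · rw [List.getElem?_set, if_neg hij, if_neg]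
          intro ⟨hm, hq⟩
          rcases List.mem_cons.mp hm with h | h
          · exact hij (by omega)
          · exact hr ⟨h, hq⟩
    · rw [if_neg hg, ih _ hlen]
      by_cases hr : (j : Int) ∈ rest ∧ orig[j]? = some '?'
      · rw [if_pos hr, if_pos ⟨List.mem_cons_of_mem _ hr.1, hr.2⟩]
      · rw [if_neg hr, if_neg]
        intro ⟨hm, hq⟩
        rcases List.mem_cons.mp hm with h | h
        · apply hg
          have hj : j < orig.length := (List.getElem?_eq_some_iff.mp hq).1
          refine ⟨by omega, by omega, ?_⟩
          have : i.toNat = j := by omega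
          rw [this]; exact hq
        · exact hr ⟨h, hq⟩

-- ===== VERDICT (by name: the statement is the Claim_ definition above) =====
theorem convert_springs_spec : Claim_equal_convert_springs := by
  intro springs combo _
  unfold Spec_convert_springs convert_springs convert_springs_alt
  set orig := springs.toList with horig
  congr 1
  rw [foldl_snoc, List.nil_append]
  apply List.ext_getElem?
  intro j
  rw [fold_getElem? orig combo _ (by simp)]
  rw [List.getElem?_map, PySem.List.getElem?_enumerate, List.getElem?_map]
  cases hoj : orig[j]? with
  | none => simp
  | some c =>
    by_cases hm : (j : Int) ∈ combo <;> by_cases hc : c = '?' <;>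
      simp [hm, hc]
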